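-- pv_equiv track=rewrite | github.com/SagarDhok/CodeDaily | GreeksOfGreeks/day-35.py | minAnd2ndMin
-- ===== SOURCE A (Python) =====
-- def minAnd2ndMin(arr):
--     mv1 = float("inf")
--     mv2 = float("inf")
--
--     for i in arr:
--       if i<mv1:
--         mv2 = mv1
--         mv1 = i
--       if i<mv2 and i!=mv1:
--         mv2 = i
--
--     if mv1 != float("inf") and mv2 != float("inf"):
--         return [mv1, mv2]
--     else:
--         return [-1]
-- ===== SOURCE B (Python) =====
-- def minAnd2ndMin(arr):
--     if not arr:
--         return [-1]
--     m1 = min(arr)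
--     rest = [x for x in arr if x != m1]
--     if not rest:
--         return [-1]
--     return [m1, min(rest)]
-- ===== Notes on version B (the rewrite author's own statement) =====
-- stated objective: simpler
-- what changed: Replaces the single-pass dual-sentinel (inf) tracking loop by two builtin min passes: min of the list, then min of the elements different from it, with early returns for the degenerate cases.
import Mathlib
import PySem

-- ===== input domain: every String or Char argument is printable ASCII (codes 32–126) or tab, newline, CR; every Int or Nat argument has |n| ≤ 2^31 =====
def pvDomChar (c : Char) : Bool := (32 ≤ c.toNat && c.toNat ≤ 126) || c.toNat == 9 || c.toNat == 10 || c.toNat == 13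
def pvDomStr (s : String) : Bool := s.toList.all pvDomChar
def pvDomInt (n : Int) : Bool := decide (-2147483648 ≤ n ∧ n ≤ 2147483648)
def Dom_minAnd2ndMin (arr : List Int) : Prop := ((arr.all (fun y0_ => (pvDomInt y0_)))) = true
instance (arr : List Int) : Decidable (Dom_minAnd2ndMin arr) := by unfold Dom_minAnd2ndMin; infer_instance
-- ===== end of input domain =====

-- B replaces A's single-pass dual-sentinel (float('inf')) tracking loop by two builtin-min passes
-- (min of the list, then min of the elements different from it) with early returns; objective: simpler.

-- ===== PORT A =====
-- float('inf') sentinel modelled as `none` (an Int is always < inf and ≠ inf); exact on Int inputs.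
def pvLtInf (i : Int) (m : Option Int) : Bool :=
  match m with
  | none => true
  | some a => decide (i < a)

def pvNeInf (i : Int) (m : Option Int) : Bool :=
  match m with
  | none => true
  | some a => decide (i ≠ a)

def pvStepA (s : Option Int × Option Int) (i : Int) : Option Int × Option Int :=
  let s1 := if pvLtInf i s.1 then (some i, s.1) else s
  if pvLtInf i s1.2 && pvNeInf i s1.1 then (s1.1, some i) else s1

def minAnd2ndMin (arr : List Int) : List Int :=
  match arr.foldl pvStepA (none, none) with
  | (some a, some b) => [a, b]
  | _ => [-1]

-- ===== PORT B =====
def minAnd2ndMin_alt (arr : List Int) : List Int :=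
  if arr = [] then [-1]
  else
    match PySem.List.min? arr (fun x => x) with
    | none => [-1]  -- unreachable: arr ≠ []
    | some m1 =>
      let rest := arr.filter (fun x => decide (x ≠ m1))
      if rest = [] then [-1]
      else
        match PySem.List.min? rest (fun x => x) with
        | none => [-1]  -- unreachable: rest ≠ []
        | some m2 => [m1, m2]

-- ===== PRECONDITION & SPEC =====
def Spec_minAnd2ndMin (arr : List Int) (out : List Int) : Prop := out = minAnd2ndMin_alt arr
instance (arr : List Int) (out : List Int) : Decidable (Spec_minAnd2ndMin arr out) := by unfold Spec_minAnd2ndMin; infer_instance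

-- ===== CLAIM (what is proved, stated in full; the proofs are below) =====
def Claim_equal_minAnd2ndMin : Prop := ∀ (arr : List Int), Dom_minAnd2ndMin arr → Spec_minAnd2ndMin arr (minAnd2ndMin arr)

-- ===== LEMMAS AND PROOFS =====

def pvM1 (l : List Int) : Option Int := PySem.List.min? l (fun x => x)

def pvM2 (l : List Int) : Option Int :=
  (pvM1 l).bind (fun a => PySem.List.min? (l.filter (fun x => decide (x ≠ a))) (fun x => x))

theorem pvMin?_append_id (l : List Int) (i : Int) :
    PySem.List.min? (l ++ [i]) (fun x => x) =
      some (match PySem.List.min? l (fun x => x) with | none => i | some a => min a i) := by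
  cases l with
  | nil => simp [PySem.List.min?]
  | cons x t =>
    rw [List.cons_append, PySem.List.min?_id_cons, PySem.List.min?_id_cons, List.foldl_append]
    simp

theorem pvFilter_of_lt_min (l : List Int) (a i : Int)
    (h : pvM1 l = some a) (hi : i < a) :
    l.filter (fun x => decide (x ≠ i)) = l := by
  apply List.filter_eq_self.mpr
  intro x hx
  have := PySem.List.min?_isMin h x hx
  simp only [decide_eq_true_eq]
  omega

theorem pvStep_spec (l : List Int) (i : Int) :
    pvStepA (pvM1 l, pvM2 l) i = (pvM1 (l ++ [i]), pvM2 (l ++ [i])) := by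
  cases h1 : pvM1 l with
  | none =>
    have hl : l = [] := (PySem.List.min?_eq_none_iff l _).mp h1
    subst hl
    simp [pvStepA, pvLtInf, pvNeInf, pvM1, pvM2, PySem.List.min?]
  | some a =>
    have h1' : PySem.List.min? l (fun x => x) = some a := h1
    have hM1 : pvM1 (l ++ [i]) = some (min a i) := by
      rw [pvM1, pvMin?_append_id, h1']
    by_cases hia : i < a
    · -- new minimum: state becomes (some i, some a)
      have hmin : min a i = i := by omega
      have hfe : (l ++ [i]).filter (fun x => decide (x ≠ i)) = l := by
        rw [List.filter_append, pvFilter_of_lt_min l a i h1 hia]; simp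
      have hM2 : pvM2 (l ++ [i]) = some a := by
        rw [pvM2, hM1, hmin]
        simp only [Option.bind_some]
        rw [hfe, h1']
      rw [hM1, hmin, hM2]
      simp [pvStepA, pvLtInf, pvNeInf, hia]
    · by_cases hieq : i = a
      · -- duplicate of the minimum: state unchanged
        subst hieq
        have hmin : min i i = i := by omega
        have hM2 : pvM2 (l ++ [i]) = pvM2 l := by
          rw [pvM2, hM1, hmin, pvM2, h1]
          simp only [Option.bind_some]
          rw [List.filter_append]
          simp
        rw [hM1, hmin, hM2]
        cases h2 : pvM2 l with
        | none => simp [pvStepA, pvLtInf, pvNeInf]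
        | some b => simp [pvStepA, pvLtInf, pvNeInf]
      · -- i > a: only the second slot can change
        have hmin : min a i = a := by omega
        have hfe : (l ++ [i]).filter (fun x => decide (x ≠ a)) =
            l.filter (fun x => decide (x ≠ a)) ++ [i] := by
          rw [List.filter_append]; simp [hieq]
        have hM2 : pvM2 (l ++ [i]) =
            some (match PySem.List.min? (l.filter (fun x => decide (x ≠ a))) (fun x => x) with
                  | none => i | some b => min b i) := by
          rw [pvM2, hM1, hmin]
          simp only [Option.bind_some]
          rw [hfe, pvMin?_append_id]
        rw [hM1, hmin, hM2]
        have h2' : pvM2 l =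
            PySem.List.min? (l.filter (fun x => decide (x ≠ a))) (fun x => x) := by
          rw [pvM2, h1]; simp only [Option.bind_some]
        cases h2 : PySem.List.min? (l.filter (fun x => decide (x ≠ a))) (fun x => x) with
        | none =>
          rw [h2'] at *
          rw [h2]
          simp [pvStepA, pvLtInf, pvNeInf, hia, hieq]
        | some b =>
          rw [h2'] at *
          rw [h2]
          by_cases hib : i < b
          · have hm : min b i = i := by omega
            simp [pvStepA, pvLtInf, pvNeInf, hia, hib, hieq, hm]
          · have hm : min b i = b := by omega
            simp [pvStepA, pvLtInf, pvNeInf, hia, hib, hieq, hm]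

theorem pvFold_eq (l : List Int) :
    l.foldl pvStepA (none, none) = (pvM1 l, pvM2 l) := by
  induction l using List.reverseRecOn with
  | nil => simp [pvM1, pvM2, PySem.List.min?]
  | append_singleton t i ih =>
    rw [List.foldl_append, ih]
    simpa using pvStep_spec t i

-- ===== VERDICT (by name: the statement is the Claim_ definition above) =====
theorem minAnd2ndMin_spec : Claim_equal_minAnd2ndMin := by
  intro arr _
  unfold Spec_minAnd2ndMin minAnd2ndMin
  rw [pvFold_eq]
  cases h1 : pvM1 arr with
  | none =>
    have hl : arr = [] := (PySem.List.min?_eq_none_iff arr _).mp h1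
    subst hl
    decide
  | some a =>
    have h1' : PySem.List.min? arr (fun x => x) = some a := h1
    have hne : arr ≠ [] := by
      intro hl; subst hl; rw [pvM1, PySem.List.min?] at h1; cases h1
    have h2' : pvM2 arr =
        PySem.List.min? (arr.filter (fun x => decide (x ≠ a))) (fun x => x) := by
      rw [pvM2, h1]; simp only [Option.bind_some]
    cases h2 : pvM2 arr with
    | none =>
      have hrest : arr.filter (fun x => decide (x ≠ a)) = [] :=
        (PySem.List.min?_eq_none_iff _ _).mp (h2' ▸ h2)
      simp only [minAnd2ndMin_alt, if_neg hne, h1']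
      rw [if_pos hrest]
    | some b =>
      have hmin2 : PySem.List.min? (arr.filter (fun x => decide (x ≠ a))) (fun x => x) = some b :=
        h2' ▸ h2
      have hrest : arr.filter (fun x => decide (x ≠ a)) ≠ [] := by
        intro hl; rw [hl, PySem.List.min?] at hmin2; cases hmin2
      simp only [minAnd2ndMin_alt, if_neg hne, h1']
      rw [if_neg hrest, hmin2]
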